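-- pv_equiv track=rewrite | github.com/vonDubenshire/norm | competitor_data/scrape.py | classify_urls
-- ===== SOURCE A (Python) =====
-- from typing import Dict, List, Optional, Tuple
--
-- BASE_URL = "https://normmacdonaldarchive.com"
--
-- CATEGORY_HUB_PATHS = ["/nml", "/standup", "/blue-card-jokes", "/bucket-list", "/the-list"]
--
-- def classify_urls(urls: List[str]) -> Dict[str, List[str]]:
--     hubs = {f"{BASE_URL}{p}" for p in CATEGORY_HUB_PATHS}
--     out = {"appearance_pages": [], "category_hubs": [], "other_pages": []}
--     for u in urls:
--         if "/the-list/appearance-" in u: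
--             out["appearance_pages"].append(u)
--         elif u in hubs:
--             out["category_hubs"].append(u)
--         else:
--             out["other_pages"].append(u)
--     for k in out:
--         out[k] = sorted(out[k])
--     return out
-- ===== SOURCE B (Python) =====
-- from typing import Dict, List
--
-- BASE_URL = "https://normmacdonaldarchive.com"
--
-- CATEGORY_HUB_PATHS = ["/nml", "/standup", "/blue-card-jokes", "/bucket-list", "/the-list"]
--
-- def classify_urls(urls: List[str]) -> Dict[str, List[str]]:
--     # No mutable bucket loop: a total key function assigns each url its
--     # category name, and a dict comprehension over the three fixed keys
--     # builds each bucket as a sorted filtered pass over the input.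
--     hubs = {BASE_URL + p for p in CATEGORY_HUB_PATHS}
--
--     def category(u: str) -> str:
--         if "/the-list/appearance-" in u:
--             return "appearance_pages"
--         if u in hubs:
--             return "category_hubs"
--         return "other_pages"
--
--     return {k: sorted(u for u in urls if category(u) == k)
--             for k in ("appearance_pages", "category_hubs", "other_pages")}
-- ===== Notes on version B (the rewrite author's own statement) =====
-- stated objective: idiomatic
-- what changed: A threads one loop that appends into three mutable bucket lists and then sorts each bucket; B has no bucket-accumulator loop at all: it defines a total key function url->category name and builds the dict by a comprehension over the three fixed keys, each bucket being a sorted filtered pass over the input.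
import Mathlib
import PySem

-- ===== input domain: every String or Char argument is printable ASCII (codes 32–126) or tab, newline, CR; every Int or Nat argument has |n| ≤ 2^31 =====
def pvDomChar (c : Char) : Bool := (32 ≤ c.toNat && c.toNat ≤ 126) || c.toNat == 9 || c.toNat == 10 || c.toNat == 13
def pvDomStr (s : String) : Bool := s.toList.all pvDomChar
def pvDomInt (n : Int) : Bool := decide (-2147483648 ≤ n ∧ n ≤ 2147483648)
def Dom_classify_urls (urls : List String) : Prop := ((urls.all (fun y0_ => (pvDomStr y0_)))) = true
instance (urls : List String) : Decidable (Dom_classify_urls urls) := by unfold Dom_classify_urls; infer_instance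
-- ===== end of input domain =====

-- B replaces A's mutable-bucket loop by a total url->category key function and a
-- comprehension over the three fixed keys (sorted filtered pass per key); proved equal.


-- ===== PORT A =====
def BASE_URL : String := "https://normmacdonaldarchive.com"

def CATEGORY_HUB_PATHS : List String :=
  ["/nml", "/standup", "/blue-card-jokes", "/bucket-list", "/the-list"]

-- f"{BASE_URL}{p}": string concatenation ported by hand via List Char (exact for any strings)
def strConcat (a b : String) : String := String.ofList (a.toList ++ b.toList)

-- hubs = {f"{BASE_URL}{p}" for p in CATEGORY_HUB_PATHS}
def hubs : PySem.Set String := PySem.Set.ofList (CATEGORY_HUB_PATHS.map (strConcat BASE_URL))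

-- the dict 'out' has three fixed keys; its three value lists are the fold state
def classifyStep (s : List String × List String × List String) (u : String) :
    List String × List String × List String :=
  if PySem.Str.isIn "/the-list/appearance-" u then (s.1 ++ [u], s.2.1, s.2.2)
  else if PySem.Set.contains hubs u then (s.1, s.2.1 ++ [u], s.2.2)
  else (s.1, s.2.1, s.2.2 ++ [u])

def classify_urls (urls : List String) : List (String × List String) :=
  let out := urls.foldl classifyStep ([], [], [])
  -- for k in out: out[k] = sorted(out[k])
  [("appearance_pages", PySem.List.sorted out.1 (fun x => x) false),
   ("category_hubs", PySem.List.sorted out.2.1 (fun x => x) false),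
   ("other_pages", PySem.List.sorted out.2.2 (fun x => x) false)]

-- ===== PORT B =====
-- hubs = {BASE_URL + p for p in CATEGORY_HUB_PATHS} (B builds its own set)
def hubsB : PySem.Set String := PySem.Set.ofList (CATEGORY_HUB_PATHS.map (strConcat BASE_URL))

-- the total key function: url -> its category name
def category (u : String) : String :=
  if PySem.Str.isIn "/the-list/appearance-" u then "appearance_pages"
  else if PySem.Set.contains hubsB u then "category_hubs"
  else "other_pages"

def classify_urls_alt (urls : List String) : List (String × List String) :=
  -- {k: sorted(u for u in urls if category(u) == k) for k in (...)}
  ["appearance_pages", "category_hubs", "other_pages"].map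
    (fun k => (k, PySem.List.sorted (urls.filter (fun u => category u == k)) (fun x => x) false))

-- ===== PRECONDITION & SPEC =====
def Spec_classify_urls (urls : List String) (out : List (String × List String)) : Prop := out = classify_urls_alt urls
instance (urls : List String) (out : List (String × List String)) : Decidable (Spec_classify_urls urls out) := by unfold Spec_classify_urls; infer_instance

-- ===== CLAIM (what is proved, stated in full; the proofs are below) =====
def Claim_equal_classify_urls : Prop := ∀ (urls : List String), Dom_classify_urls urls → Spec_classify_urls urls (classify_urls urls)

-- ===== LEMMAS AND PROOFS =====

def pApp (u : String) : Bool := PySem.Str.isIn "/the-list/appearance-" u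
def pHub (u : String) : Bool := !pApp u && PySem.Set.contains hubs u
def pOth (u : String) : Bool := !pApp u && !PySem.Set.contains hubs u

-- A's partition loop computes the three filters of its input, appended to the accumulators
theorem foldl_classifyStep (l : List String) :
    ∀ a c o : List String,
      l.foldl classifyStep (a, c, o) =
        (a ++ l.filter pApp, c ++ l.filter pHub, o ++ l.filter pOth) := by
  induction l with
  | nil => intro a c o; simp
  | cons x t ih =>
    intro a c o
    by_cases h1 : PySem.Str.isIn "/the-list/appearance-" x = true
    · have hp : pApp x = true := h1
      have hh : pHub x = false := by unfold pHub pApp; rw [h1]; rfl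
      have ho : pOth x = false := by unfold pOth pApp; rw [h1]; rfl
      have hstep : classifyStep (a, c, o) x = (a ++ [x], c, o) := by
        unfold classifyStep; rw [if_pos h1]
      rw [List.foldl_cons, hstep, ih]
      simp [hp, hh, ho]
    · have hIn : PySem.Str.isIn "/the-list/appearance-" x = false := Bool.eq_false_iff.mpr h1
      have hp : pApp x = false := hIn
      by_cases h2 : PySem.Set.contains hubs x = true
      · have hh : pHub x = true := by unfold pHub pApp; rw [hIn, h2]; rfl
        have ho : pOth x = false := by unfold pOth pApp; rw [hIn, h2]; rfl
        have hstep : classifyStep (a, c, o) x = (a, c ++ [x], o) := by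
          unfold classifyStep; rw [if_neg h1, if_pos h2]
        rw [List.foldl_cons, hstep, ih]
        simp [hp, hh, ho]
      · have hC : PySem.Set.contains hubs x = false := Bool.eq_false_iff.mpr h2
        have hh : pHub x = false := by unfold pHub pApp; rw [hIn, hC]; rfl
        have ho : pOth x = true := by unfold pOth pApp; rw [hIn, hC]; rfl
        have hstep : classifyStep (a, c, o) x = (a, c, o ++ [x]) := by
          unfold classifyStep; rw [if_neg h1, if_neg h2]
        rw [List.foldl_cons, hstep, ih]
        simp [hp, hh, ho]

-- B's per-key filter predicates coincide with A's partition predicates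
theorem hubs_eq : hubs = hubsB := rfl

theorem cat_app (u : String) : (category u == "appearance_pages") = pApp u := by
  unfold category pApp
  by_cases h1 : PySem.Str.isIn "/the-list/appearance-" u = true
  · rw [if_pos h1, h1]; rfl
  · rw [if_neg h1, Bool.eq_false_iff.mpr h1]
    by_cases h2 : PySem.Set.contains hubsB u = true
    · rw [if_pos h2]; rfl
    · rw [if_neg h2]; rfl

theorem cat_hub (u : String) : (category u == "category_hubs") = pHub u := by
  unfold category pHub pApp
  rw [hubs_eq]
  by_cases h1 : PySem.Str.isIn "/the-list/appearance-" u = true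
  · rw [if_pos h1, h1]; rfl
  · rw [if_neg h1, Bool.eq_false_iff.mpr h1]
    by_cases h2 : PySem.Set.contains hubsB u = true
    · rw [if_pos h2, h2]; rfl
    · rw [if_neg h2, Bool.eq_false_iff.mpr h2]; rfl

theorem cat_oth (u : String) : (category u == "other_pages") = pOth u := by
  unfold category pOth pApp
  rw [hubs_eq]
  by_cases h1 : PySem.Str.isIn "/the-list/appearance-" u = true
  · rw [if_pos h1, h1]; rfl
  · rw [if_neg h1, Bool.eq_false_iff.mpr h1]
    by_cases h2 : PySem.Set.contains hubsB u = true
    · rw [if_pos h2, h2]; rfl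
    · rw [if_neg h2, Bool.eq_false_iff.mpr h2]; rfl

-- ===== VERDICT (by name: the statement is the Claim_ definition above) =====
theorem classify_urls_spec : Claim_equal_classify_urls := by
  intro urls _
  show classify_urls urls = classify_urls_alt urls
  simp only [classify_urls, classify_urls_alt, foldl_classifyStep, List.nil_append,
    List.map, cat_app, cat_hub, cat_oth]
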